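-- pv_equiv track=rewrite | github.com/Nunolxm/ATP | TPC7/TPC7.py | distribEscalao
-- ===== SOURCE A (Python) =====
-- def distribEscalao(alunos):
--     distrib = {}
--     for aluno in alunos:
--         if aluno["escalao"] in distrib.keys():
--             distrib[aluno["escalao"]] += 1
--         else:
--             distrib[aluno["escalao"]] = 1
--     return distrib
-- ===== SOURCE B (Python) =====
-- def distribEscalao(alunos):
--     vals = [a["escalao"] for a in alunos]
--     return {e: vals.count(e) for e in dict.fromkeys(vals)}
-- ===== Notes on version B (the rewrite author's own statement) =====
-- stated objective: simpler
-- what changed: Replaces the accumulating dict pass (membership test, increment-or-init) with collecting the bracket values once and a dict comprehension over the distinct values counting each with list.count.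
import Mathlib
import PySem

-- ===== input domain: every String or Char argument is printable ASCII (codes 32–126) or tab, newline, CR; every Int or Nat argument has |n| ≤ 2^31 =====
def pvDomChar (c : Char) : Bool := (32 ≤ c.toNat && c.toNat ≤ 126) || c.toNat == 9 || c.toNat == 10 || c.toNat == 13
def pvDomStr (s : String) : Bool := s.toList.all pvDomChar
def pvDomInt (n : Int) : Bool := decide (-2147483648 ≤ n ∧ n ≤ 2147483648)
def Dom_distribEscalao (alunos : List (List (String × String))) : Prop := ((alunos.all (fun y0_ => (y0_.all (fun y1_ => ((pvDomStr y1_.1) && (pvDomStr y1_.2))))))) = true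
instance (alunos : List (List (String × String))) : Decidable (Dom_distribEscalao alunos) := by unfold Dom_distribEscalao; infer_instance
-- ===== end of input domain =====

-- B collects the bracket values once and builds the result as a dict comprehension
-- over the distinct values with list.count, instead of A's single accumulating dict pass.


-- ===== PORT A =====
-- aluno["escalao"] raises KeyError when the key is missing; total via getD under Pre_.
def distribEscalao (alunos : List (List (String × String))) : List (String × Int) :=
  (alunos.foldl
    (fun distrib aluno =>
      let e := (PySem.Dict.mk aluno).getD "escalao" ""
      if distrib.contains e then distrib.insert e (distrib.getD e 0 + 1)
      else distrib.insert e 1)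
    PySem.Dict.empty).items

-- ===== PORT B =====
def distribEscalao_alt (alunos : List (List (String × String))) : List (String × Int) :=
  let vals := alunos.map (fun a => (PySem.Dict.mk a).getD "escalao" "")
  (PySem.List.dedup vals).map (fun e => (e, (vals.count e : Int)))

-- ===== PRECONDITION & SPEC =====
-- Pre_ excludes exactly the inputs where A raises KeyError: some aluno lacks the key "escalao".
def Pre_distribEscalao (alunos : List (List (String × String))) : Prop :=
  ∀ a ∈ alunos, (PySem.Dict.mk a).contains "escalao" = true
instance (alunos : List (List (String × String))) : Decidable (Pre_distribEscalao alunos) := by unfold Pre_distribEscalao; infer_instance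
def pvWitness_distribEscalao : (List (List (String × String))) := [[("escalao", "A")], [("escalao", "B"), ("nome", "x")]]

def Spec_distribEscalao (alunos : List (List (String × String))) (out : List (String × Int)) : Prop := out = distribEscalao_alt alunos
instance (alunos : List (List (String × String))) (out : List (String × Int)) : Decidable (Spec_distribEscalao alunos out) := by unfold Spec_distribEscalao; infer_instance

-- ===== CLAIM (what is proved, stated in full; the proofs are below) =====
def Claim_equal_distribEscalao : Prop := ∀ (alunos : List (List (String × String))), Dom_distribEscalao alunos → Pre_distribEscalao alunos → Spec_distribEscalao alunos (distribEscalao alunos)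

-- ===== LEMMAS AND PROOFS =====
-- A's branching step is the Counter step: when the key is absent, getD gives 0.
theorem distrib_step_eq (d : PySem.Dict String Int) (e : String) :
    (if d.contains e then d.insert e (d.getD e 0 + 1) else d.insert e 1)
      = d.insert e (d.getD e 0 + 1) := by
  by_cases h : d.contains e = true
  · simp [h]
  · simp only [Bool.not_eq_true] at h
    simp [h, PySem.Dict.getD_of_not_contains d 0 h]

-- The whole loop, from any accumulator, is the Counter fold over the extracted values.
theorem distrib_fold_eq (l : List (List (String × String))) (d : PySem.Dict String Int) :
    l.foldl
      (fun distrib aluno =>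
        let e := (PySem.Dict.mk aluno).getD "escalao" ""
        if distrib.contains e then distrib.insert e (distrib.getD e 0 + 1)
        else distrib.insert e 1) d
    = (l.map (fun a => (PySem.Dict.mk a).getD "escalao" "")).foldl
        (fun d x => d.insert x (d.getD x 0 + 1)) d := by
  induction l generalizing d with
  | nil => rfl
  | cons a t ih =>
    simp only [List.foldl_cons, List.map_cons]
    rw [← ih, distrib_step_eq]

-- ===== VERDICT (by name: the statement is the Claim_ definition above) =====
theorem distribEscalao_spec : Claim_equal_distribEscalao := by
  intro alunos _ _
  unfold Spec_distribEscalao distribEscalao distribEscalao_alt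
  rw [distrib_fold_eq, PySem.Dict.foldl_insert_getD_add_one_eq_counter,
      PySem.Dict.items_counter]
  simp [PySem.List.dedup_eq_ofList]
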